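-- pv_equiv track=rewrite | github.com/GuyRoberts1972/st_frame | st_ui/side_bar_state_mgr.py | key_matches_patterns
-- ===== SOURCE A (Python) =====
-- def key_matches_patterns(key, patterns):
--     """ Return true if the key matches the regex patterns """
--     for pattern in patterns:
--         if pattern.endswith('*'):
--             if key.startswith(pattern[:-1]):
--                 return True
--         elif key == pattern:
--             return True
--     return False
-- ===== SOURCE B (Python) =====
-- def key_matches_patterns(key, patterns):
--     """ Return true if the key matches the regex patterns """
--     exact = set()
--     prefixes = []
--     for p in patterns:
--         if p.endswith('*'):
--             prefixes.append(p[:-1])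
--         else:
--             exact.add(p)
--     return key in exact or any(key.startswith(p) for p in prefixes)
-- ===== Notes on version B (the rewrite author's own statement) =====
-- stated objective: alternative
-- what changed: Replaces the single interleaved branch-per-element loop by a one-pass partition of patterns into an exact-match set and a stripped-prefix list, then a set membership test plus a separate prefix scan.
import Mathlib
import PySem

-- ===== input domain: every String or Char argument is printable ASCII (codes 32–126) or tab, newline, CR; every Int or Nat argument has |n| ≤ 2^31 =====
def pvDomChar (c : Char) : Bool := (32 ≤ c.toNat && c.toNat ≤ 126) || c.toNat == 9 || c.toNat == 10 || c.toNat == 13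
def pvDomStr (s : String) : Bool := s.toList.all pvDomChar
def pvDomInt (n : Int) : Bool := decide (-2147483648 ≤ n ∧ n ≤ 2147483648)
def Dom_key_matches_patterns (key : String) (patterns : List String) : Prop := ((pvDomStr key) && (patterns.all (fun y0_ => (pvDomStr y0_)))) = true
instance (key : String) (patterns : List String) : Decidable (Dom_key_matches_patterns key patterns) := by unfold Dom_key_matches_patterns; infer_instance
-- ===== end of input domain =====

-- B partitions the patterns into an exact-match set and a stripped-prefix list, then
-- tests set membership plus a prefix scan (same boolean result as A's interleaved loop).

-- ===== PORT A =====
def key_matches_patterns (key : String) (patterns : List String) : Bool :=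
  match patterns with
  | [] => false
  | pattern :: rest =>
    if PySem.Str.endswith pattern "*" then
      if PySem.Str.startswith key (PySem.Str.slice pattern none (some (-1))) then true
      else key_matches_patterns key rest
    else if key == pattern then true
    else key_matches_patterns key rest

-- ===== PORT B =====
-- the single pass building the exact-match set and the stripped-prefix list
def kmpPartition (patterns : List String) : PySem.Set String × List String :=
  patterns.foldl
    (fun acc p =>
      if PySem.Str.endswith p "*" then (acc.1, acc.2 ++ [PySem.Str.slice p none (some (-1))])
      else (PySem.Set.add acc.1 p, acc.2))
    (PySem.Set.empty, [])

def key_matches_patterns_alt (key : String) (patterns : List String) : Bool :=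
  let pr := kmpPartition patterns
  PySem.Set.contains pr.1 key || pr.2.any (fun p => PySem.Str.startswith key p)

-- ===== PRECONDITION & SPEC =====
def Spec_key_matches_patterns (key : String) (patterns : List String) (out : Bool) : Prop := out = key_matches_patterns_alt key patterns
instance (key : String) (patterns : List String) (out : Bool) : Decidable (Spec_key_matches_patterns key patterns out) := by unfold Spec_key_matches_patterns; infer_instance

-- ===== CLAIM (what is proved, stated in full; the proofs are below) =====
def Claim_equal_key_matches_patterns : Prop := ∀ (key : String) (patterns : List String), Dom_key_matches_patterns key patterns → Spec_key_matches_patterns key patterns (key_matches_patterns key patterns)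

-- ===== LEMMAS AND PROOFS =====

theorem contains_add (s : PySem.Set String) (x y : String) :
    PySem.Set.contains (PySem.Set.add s x) y = (PySem.Set.contains s y || y == x) := by
  simp only [PySem.Set.contains, PySem.Set.add]
  by_cases hy : y = x
  · subst hy; by_cases h : y ∈ s <;> simp [h]
  · by_cases h : x ∈ s <;> simp [h, hy, List.mem_append]

-- loop invariant: folding the partition step over `patterns` starting from any accumulator
-- extends the final boolean test by exactly A's answer on `patterns`
theorem kmp_invariant (key : String) (patterns : List String) :
    ∀ (s : PySem.Set String) (ps : List String),
    (let r := patterns.foldl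
        (fun acc p =>
          if PySem.Str.endswith p "*" then (acc.1, acc.2 ++ [PySem.Str.slice p none (some (-1))])
          else (PySem.Set.add acc.1 p, acc.2)) (s, ps)
     PySem.Set.contains r.1 key || r.2.any (fun p => PySem.Str.startswith key p))
    = (PySem.Set.contains s key || ps.any (fun p => PySem.Str.startswith key p)
        || key_matches_patterns key patterns) := by
  induction patterns with
  | nil => intro s ps; simp [key_matches_patterns]
  | cons p rest ih =>
    intro s ps
    simp only [List.foldl_cons]
    by_cases hw : PySem.Str.endswith p "*"
    · rw [if_pos hw]
      simp only [ih, key_matches_patterns, if_pos hw, List.any_append, List.any_cons,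
        List.any_nil, Bool.or_false]
      cases hs : PySem.Str.startswith key (PySem.Str.slice p none (some (-1))) <;>
        cases PySem.Set.contains s key <;>
        cases ps.any (fun p => PySem.Str.startswith key p) <;>
        cases key_matches_patterns key rest <;> simp
    · rw [if_neg hw]
      simp only [ih, key_matches_patterns, if_neg hw, contains_add]
      cases hk : key == p <;>
        cases PySem.Set.contains s key <;>
        cases ps.any (fun p => PySem.Str.startswith key p) <;>
        cases key_matches_patterns key rest <;> simp

-- ===== VERDICT (by name: the statement is the Claim_ definition above) =====
theorem key_matches_patterns_spec : Claim_equal_key_matches_patterns := by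
  intro key patterns _
  unfold Spec_key_matches_patterns key_matches_patterns_alt kmpPartition
  have h := kmp_invariant key patterns PySem.Set.empty []
  simp only [List.any_nil, Bool.or_false] at h
  simp only []
  rw [h]
  simp [PySem.Set.empty, PySem.Set.contains]
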